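-- pv_equiv track=rewrite | github.com/puru-samal/grooveiq | data/descriptors.py | _find_strongest_position
-- ===== SOURCE A (Python) =====
-- def _find_strongest_position(metrical_profile, start, end):
--     """
--     Find the position with the strongest metrical value in the given range.
--
--     Args:
--         metrical_profile (list): Metrical strength values
--         start (int): Start position (inclusive)
--         end (int): End position (exclusive)
--
--     Returns:
--         int: Position with strongest metrical value
--     """
--     if start >= end:
--         return start
--
--     # Find the maximum metrical value in the range
--     max_strength = max(metrical_profile[start:end])
--
--     # Return the first position with this maximum value
--     for i in range(start, end):
--         if metrical_profile[i] == max_strength: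
--             return i
--
--     return start
-- ===== SOURCE B (Python) =====
-- def _find_strongest_position(metrical_profile, start, end):
--     if start >= end:
--         return start
--     best_index = start
--     best_value = metrical_profile[start]
--     for i in range(start + 1, end):
--         if metrical_profile[i] > best_value:
--             best_value = metrical_profile[i]
--             best_index = i
--     return best_index
-- ===== Notes on version B (the rewrite author's own statement) =====
-- stated objective: simpler
-- what changed: Replaces A's two passes (max() over a slice, then a re-scan for the first index equal to that max) with a single left-to-right scan maintaining the running first-occurrence argmax with a strict '>' comparison.
-- outside the precondition, e.g. on _find_strongest_position([1, 2, 3], 0, 5): A returns 2, B raises IndexError; on _find_strongest_position([1, 2, 3], -2, 2): A returns -2, B returns -1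
import Mathlib
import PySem

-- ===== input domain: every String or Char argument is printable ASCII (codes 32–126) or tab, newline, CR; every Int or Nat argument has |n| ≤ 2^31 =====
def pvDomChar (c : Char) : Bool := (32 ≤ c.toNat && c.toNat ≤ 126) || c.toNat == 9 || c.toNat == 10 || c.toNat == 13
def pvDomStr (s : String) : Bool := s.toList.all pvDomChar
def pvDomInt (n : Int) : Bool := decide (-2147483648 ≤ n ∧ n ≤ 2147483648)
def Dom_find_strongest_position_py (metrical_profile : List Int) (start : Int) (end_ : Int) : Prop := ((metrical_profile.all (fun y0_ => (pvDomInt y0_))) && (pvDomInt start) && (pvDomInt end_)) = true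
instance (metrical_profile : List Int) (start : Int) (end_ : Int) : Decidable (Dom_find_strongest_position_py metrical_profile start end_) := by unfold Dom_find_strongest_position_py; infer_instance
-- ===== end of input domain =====

-- B replaces A's two passes (max over a slice, then a re-scan for the first index equal to it)
-- by a single left-to-right scan keeping the running first-occurrence argmax (objective: simpler).

-- ===== PORT A =====
-- Literal port of A: guard, max over the slice (none = max([]) raises ValueError, unreachable
-- under Pre_), then the first index in range(start, end) whose entry equals that max
-- (pyGetD with default 0: under Pre_ every scanned index is in range, so the default never fires;
-- find? none = the loop falling through to the trailing 'return start').
def find_strongest_position_py (metrical_profile : List Int) (start : Int) (end_ : Int) : Int :=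
  if start ≥ end_ then start
  else
    match PySem.List.max? (PySem.List.slice metrical_profile (some start) (some end_)) (fun y => y) with
    | none => start
    | some max_strength =>
      match (PySem.List.pyRange start end_ 1).find?
          (fun i => PySem.List.pyGetD metrical_profile i 0 == max_strength) with
      | some i => i
      | none => start

-- ===== PORT B =====
-- Literal port of B: one pass with state (best_index, best_value), strict '>' keeps the first max.
def find_strongest_position_py_alt (metrical_profile : List Int) (start : Int) (end_ : Int) : Int :=
  if start ≥ end_ then start
  else
    ((PySem.List.pyRange (start + 1) end_ 1).foldl
      (fun st i =>
        if PySem.List.pyGetD metrical_profile i 0 > st.2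
        then (i, PySem.List.pyGetD metrical_profile i 0) else st)
      (start, PySem.List.pyGetD metrical_profile start 0)).1

-- ===== PRECONDITION & SPEC =====
-- Pre_ restricts to the function's natural domain: either an empty range (start >= end, where A
-- returns start without touching the list) or an in-bounds range 0 <= start < end <= len.
-- Outside it A either raises (ValueError on an empty slice, IndexError past the end) or returns a
-- value only by accident of Python's negative-index wraparound or of the loop's early exit past the
-- end, where B's natural scan raises or differs (see the cited excluded examples).
def Pre_find_strongest_position_py (metrical_profile : List Int) (start : Int) (end_ : Int) : Prop :=
  start ≥ end_ ∨ (0 ≤ start ∧ start < end_ ∧ end_ ≤ (metrical_profile.length : Int))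
instance (metrical_profile : List Int) (start : Int) (end_ : Int) : Decidable (Pre_find_strongest_position_py metrical_profile start end_) := by unfold Pre_find_strongest_position_py; infer_instance

def pvWitness_find_strongest_position_py : List Int × Int × Int := ([3, 1, 3, 2], 0, 4)

def Spec_find_strongest_position_py (metrical_profile : List Int) (start : Int) (end_ : Int) (out : Int) : Prop := out = find_strongest_position_py_alt metrical_profile start end_
instance (metrical_profile : List Int) (start : Int) (end_ : Int) (out : Int) : Decidable (Spec_find_strongest_position_py metrical_profile start end_ out) := by unfold Spec_find_strongest_position_py; infer_instance

-- ===== CLAIM (what is proved, stated in full; the proofs are below) =====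
def Claim_equal_find_strongest_position_py : Prop := ∀ (metrical_profile : List Int) (start : Int) (end_ : Int), Dom_find_strongest_position_py metrical_profile start end_ → Pre_find_strongest_position_py metrical_profile start end_ → Spec_find_strongest_position_py metrical_profile start end_ (find_strongest_position_py metrical_profile start end_)

-- ===== LEMMAS AND PROOFS =====

-- Characterisation of B's running-argmax fold over range(a, b): its value component is the running
-- max M of bv and the visited entries; if M = bv the state never changes, and if M > bv the index
-- component is exactly the first i in the range with g i = M (A's second pass).
lemma pv_fold_char (g : Int → Int) :
    ∀ (n : Nat) (a b bi bv : Int), (b - a).toNat = n → a ≤ b →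
    (((PySem.List.pyRange a b 1).foldl
        (fun st i => if g i > st.2 then (i, g i) else st) (bi, bv)).2
      = ((PySem.List.pyRange a b 1).map g).foldl max bv)
    ∧ (((PySem.List.pyRange a b 1).map g).foldl max bv = bv →
        (PySem.List.pyRange a b 1).foldl
          (fun st i => if g i > st.2 then (i, g i) else st) (bi, bv) = (bi, bv))
    ∧ (((PySem.List.pyRange a b 1).map g).foldl max bv ≠ bv →
        (PySem.List.pyRange a b 1).find?
            (fun i => g i == ((PySem.List.pyRange a b 1).map g).foldl max bv)
          = some (((PySem.List.pyRange a b 1).foldl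
              (fun st i => if g i > st.2 then (i, g i) else st) (bi, bv)).1)) := by
  intro n
  induction n with
  | zero =>
    intro a b bi bv hn hab
    have hba : b ≤ a := by omega
    simp [PySem.List.pyRange_one_eq_nil hba]
  | succ m ih =>
    intro a b bi bv hn hab
    have hlt : a < b := by omega
    rw [PySem.List.pyRange_one_cons hlt]
    have hm : (b - (a + 1)).toNat = m := by omega
    have hab1 : a + 1 ≤ b := by omega
    simp only [List.foldl_cons, List.map_cons]
    by_cases hga : g a > bv
    · -- the first entry improves the state
      have hmax : max bv (g a) = g a := by omega
      rw [if_pos hga, hmax]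
      obtain ⟨h1, h2, h3⟩ := ih (a + 1) b a (g a) hm hab1
      have hge : g a ≤ ((PySem.List.pyRange (a + 1) b 1).map g).foldl max (g a) :=
        (PySem.List.le_foldl_max _ _).1
      refine ⟨h1, ?_, ?_⟩
      · intro hM; omega
      · intro _
        by_cases heq : g a = ((PySem.List.pyRange (a + 1) b 1).map g).foldl max (g a)
        · rw [List.find?_cons_of_pos (by simpa using heq)]
          rw [h2 heq.symm]
        · have hne : ((PySem.List.pyRange (a + 1) b 1).map g).foldl max (g a) ≠ g a :=
            fun h => heq h.symm
          rw [List.find?_cons_of_neg (by simpa using heq)]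
          exact h3 hne
    · -- the first entry does not improve the state
      have hle : g a ≤ bv := by omega
      have hmax : max bv (g a) = bv := by omega
      rw [if_neg hga, hmax]
      obtain ⟨h1, h2, h3⟩ := ih (a + 1) b bi bv hm hab1
      have hge : bv ≤ ((PySem.List.pyRange (a + 1) b 1).map g).foldl max bv :=
        (PySem.List.le_foldl_max _ _).1
      refine ⟨h1, h2, ?_⟩
      · intro hne
        have hga_ne : g a ≠ ((PySem.List.pyRange (a + 1) b 1).map g).foldl max bv := by
          intro h; omega
        rw [List.find?_cons_of_neg (by simpa using hga_ne)]
        exact h3 hne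

-- In-bounds slice equals the range of looked-up entries (A's slice vs the index loop).
lemma pv_slice_eq_map (mp : List Int) (a b : Int) (h0 : 0 ≤ a) (hab : a ≤ b)
    (hb : b ≤ (mp.length : Int)) :
    PySem.List.slice mp (some a) (some b)
      = (PySem.List.pyRange a b 1).map (fun i => PySem.List.pyGetD mp i 0) := by
  rw [PySem.List.slice_of_nonneg mp h0 (by omega) (by omega) hb]
  apply List.ext_getElem
  · simp [PySem.List.length_pyRange_one]
    omega
  · intro k hk1 hk2
    have hk : k < (b - a).toNat := by
      simpa [PySem.List.length_pyRange_one] using hk2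
    have hidx : a.toNat + k < mp.length := by omega
    simp only [List.getElem_take, List.getElem_drop, List.getElem_map]
    rw [PySem.List.getElem_pyRange_one]
    rw [PySem.List.pyGetD_eq_getElem mp 0 (by omega) (by omega)]
    congr 1
    omega

-- ===== VERDICT (by name: the statement is the Claim_ definition above) =====
theorem find_strongest_position_py_spec : Claim_equal_find_strongest_position_py := by
  intro mp start end_ _ hpre
  unfold Spec_find_strongest_position_py
  unfold find_strongest_position_py find_strongest_position_py_alt
  by_cases hge : start ≥ end_
  · simp [hge]
  · rw [if_neg hge, if_neg hge]
    have hlt : start < end_ := by omega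
    obtain ⟨h0, _, hlen⟩ : 0 ≤ start ∧ start < end_ ∧ end_ ≤ (mp.length : Int) := by
      rcases hpre with h | h
      · omega
      · exact h
    set g : Int → Int := fun i => PySem.List.pyGetD mp i 0 with hg
    -- rewrite A's slice and max
    rw [pv_slice_eq_map mp start end_ h0 (le_of_lt hlt) hlen]
    rw [PySem.List.pyRange_one_cons hlt, List.map_cons, PySem.List.max?_id_cons]
    -- characterise B's fold
    obtain ⟨hsnd, hstay, hfind⟩ :=
      pv_fold_char g (end_ - (start + 1)).toNat (start + 1) end_ start (g start) rfl (by omega)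
    set M := ((PySem.List.pyRange (start + 1) end_ 1).map g).foldl max (g start) with hM
    show (match List.find? (fun i => g i == M) (start :: PySem.List.pyRange (start + 1) end_ 1) with
      | some i => i
      | none => start) = _
    by_cases hMeq : M = g start
    · -- no improvement: B returns start; A finds start first
      rw [List.find?_cons_of_pos (by simp [hMeq])]
      rw [hstay hMeq]
    · -- improvement: A skips start and both find the same index
      rw [List.find?_cons_of_neg (by simpa using fun h : g start = M => hMeq h.symm)]
      rw [hfind hMeq]
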